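-- pv_equiv track=rewrite | github.com/cmbenello/es | rebuild_summary.py | _pick_best_config_line
-- ===== SOURCE A (Python) =====
-- from typing import Optional, Dict, Any, Tuple, List
--
-- def _pick_best_config_line(block: str, label: str) -> Optional[str]:
--     """
--     In a table block, pick the best row for label:
--       prefer label[avg], else label[1], else first label[*] row.
--     Returns the stripped line.
--     """
--     best_line = None
--     fallback_line = None
--
--     for line in block.splitlines():
--         s = line.strip()
--         if not s.startswith(label + "["):
--             continue
--
--         # strongest preference
--         if s.startswith(label + "[avg]"):
--             return s
--
--         # next preference
--         if best_line is None and s.startswith(label + "[1]"):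
--             best_line = s
--
--         # fallback: first occurrence of any run index
--         if fallback_line is None:
--             fallback_line = s
--
--     return best_line or fallback_line
-- ===== SOURCE B (Python) =====
-- from typing import Optional
--
--
-- def _pick_best_config_line(block: str, label: str) -> Optional[str]:
--     # Gather all matching stripped rows once, then select by priority.
--     cands = [s for line in block.splitlines()
--              if (s := line.strip()).startswith(label + "[")]
--     avg = next((s for s in cands if s.startswith(label + "[avg]")), None)
--     if avg is not None:
--         return avg
--     one = next((s for s in cands if s.startswith(label + "[1]")), None)
--     if one is not None:
--         return one
--     return cands[0] if cands else None
-- ===== Notes on version B (the rewrite author's own statement) =====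
-- stated objective: simpler
-- what changed: A interleaves three priority levels with early-return and two accumulator variables in one loop; B first filters the stripped matching rows into one candidate list and then selects by priority with three independent first-match lookups.
import Mathlib
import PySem

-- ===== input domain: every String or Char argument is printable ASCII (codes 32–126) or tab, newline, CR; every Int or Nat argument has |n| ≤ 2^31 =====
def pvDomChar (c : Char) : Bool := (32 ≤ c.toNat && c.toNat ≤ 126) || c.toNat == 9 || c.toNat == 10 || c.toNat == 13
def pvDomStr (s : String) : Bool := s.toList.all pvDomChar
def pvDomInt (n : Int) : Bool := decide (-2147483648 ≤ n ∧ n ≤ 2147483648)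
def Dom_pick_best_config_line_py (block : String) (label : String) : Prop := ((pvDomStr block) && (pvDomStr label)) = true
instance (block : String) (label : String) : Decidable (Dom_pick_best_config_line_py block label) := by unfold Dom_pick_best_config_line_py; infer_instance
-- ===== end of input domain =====

-- B replaces A's single loop with early-return and two accumulators by filter-then-three-first-match-lookups (simpler decomposition, same cost).

-- ===== PORT A =====
-- A's for-loop with early return ('return s' on [avg]) and the two accumulators best_line/fallback_line,
-- as structural recursion over the remaining lines with state (best, fallback).
def pickLoopA (label : String) : List String → Option String → Option String → Option String
  | [], best, fallback =>
      -- 'return best_line or fallback_line' (Python truthiness: None and "" are falsy)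
      match best with
      | none => fallback
      | some b => if b = "" then fallback else some b
  | line :: rest, best, fallback =>
      let s := PySem.Str.strip line
      if ¬ (PySem.Str.startswith s (label ++ "[") = true) then
        pickLoopA label rest best fallback
      else if PySem.Str.startswith s (label ++ "[avg]") = true then
        some s
      else
        pickLoopA label rest
          (if best = none ∧ PySem.Str.startswith s (label ++ "[1]") = true then some s else best)
          (if fallback = none then some s else fallback)

def pick_best_config_line_py (block : String) (label : String) : Option String :=
  pickLoopA label (PySem.Str.splitlines block) none none

-- ===== PORT B =====
-- B: filter the stripped matching rows into cands, then three first-match lookups by priority.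
def pick_best_config_line_py_alt (block : String) (label : String) : Option String :=
  let cands := ((PySem.Str.splitlines block).map PySem.Str.strip).filter
      (fun s => PySem.Str.startswith s (label ++ "["))
  match cands.find? (fun s => PySem.Str.startswith s (label ++ "[avg]")) with
  | some a => some a
  | none =>
    match cands.find? (fun s => PySem.Str.startswith s (label ++ "[1]")) with
    | some o => some o
    | none => cands.head?

-- ===== PRECONDITION & SPEC =====
def Spec_pick_best_config_line_py (block : String) (label : String) (out : Option String) : Prop := out = pick_best_config_line_py_alt block label
instance (block : String) (label : String) (out : Option String) : Decidable (Spec_pick_best_config_line_py block label out) := by unfold Spec_pick_best_config_line_py; infer_instance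

-- ===== CLAIM (what is proved, stated in full; the proofs are below) =====
def Claim_equal_pick_best_config_line_py : Prop := ∀ (block : String) (label : String), Dom_pick_best_config_line_py block label → Spec_pick_best_config_line_py block label (pick_best_config_line_py block label)

-- ===== LEMMAS AND PROOFS =====

-- A's loop with the three concrete startswith tests abstracted into predicates q (base), r (avg), t ([1])
def loopG (q r t : String → Bool) : List String → Option String → Option String → Option String
  | [], best, fallback =>
      match best with
      | none => fallback
      | some b => if b = "" then fallback else some b
  | s :: rest, best, fallback =>
      if ¬ (q s = true) then loopG q r t rest best fallback
      else if r s = true then some s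
      else loopG q r t rest
        (if best = none ∧ t s = true then some s else best)
        (if fallback = none then some s else fallback)

-- B's selection over a candidate list, with the loop state folded in
def selG (r t : String → Bool) (cands : List String) (best fallback : Option String) : Option String :=
  match cands.find? r with
  | some a => some a
  | none =>
    match best with
    | some b => some b
    | none =>
      match cands.find? t with
      | some o => some o
      | none =>
        match fallback with
        | some f => some f
        | none => cands.head?

lemma pickLoopA_eq_loopG (label : String) (ls : List String) (b f : Option String) :
    pickLoopA label ls b f =
      loopG (fun s => PySem.Str.startswith s (label ++ "["))
            (fun s => PySem.Str.startswith s (label ++ "[avg]"))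
            (fun s => PySem.Str.startswith s (label ++ "[1]"))
            (ls.map PySem.Str.strip) b f := by
  induction ls generalizing b f with
  | nil => rfl
  | cons l rest ih => simp only [pickLoopA, loopG, List.map_cons, ih]

lemma loopG_eq_selG (q r t : String → Bool) (hq : ∀ s, q s = true → s ≠ "")
    (xs : List String) (best fallback : Option String)
    (hb : ∀ b, best = some b → b ≠ "") :
    loopG q r t xs best fallback = selG r t (xs.filter q) best fallback := by
  induction xs generalizing best fallback with
  | nil =>
    cases best with
    | none => cases fallback <;> rfl
    | some b => simp only [loopG, selG, List.filter_nil, List.find?_nil, hb b rfl, if_false]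
  | cons s rest ih =>
    by_cases hqs : q s = true
    · rw [List.filter_cons_of_pos hqs]
      by_cases hrs : r s = true
      · rw [loopG]
        simp only [hqs, not_true, if_false, hrs, if_true, selG, List.find?_cons_of_pos hrs]
      · have hrs' : r s = false := by simp [hrs]
        have hfrc : List.find? r (s :: rest.filter q) = List.find? r (rest.filter q) :=
          List.find?_cons_of_neg (by simp [hrs'])
        have hftc : ∀ h : t s = false,
            List.find? t (s :: rest.filter q) = List.find? t (rest.filter q) :=
          fun h => List.find?_cons_of_neg (by simp [h])
        rw [loopG]
        simp only [hqs, not_true, if_false, hrs', Bool.false_eq_true]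
        cases best with
        | some b =>
          rw [if_neg (by simp), ih _ _ hb]
          simp only [selG, hfrc]
        | none =>
          by_cases hts : t s = true
          · rw [if_pos ⟨rfl, hts⟩, ih _ _ (fun b' h => by cases h; exact hq s hqs)]
            cases hfr : List.find? r (rest.filter q) <;>
              simp only [selG, hfrc, hfr, List.find?_cons_of_pos hts]
          · have hts' : t s = false := by simp [hts]
            rw [if_neg (by simp [hts']), ih _ _ (fun b' h => by cases h)]
            cases hfr : List.find? r (rest.filter q) <;>
              cases hft : List.find? t (rest.filter q)
            all_goals try simp only [selG, hfrc, hftc hts', hfr, hft]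
            all_goals try (cases fallback <;> simp [List.head?])
    · have hqs' : q s = false := by simp [hqs]
      rw [loopG, List.filter_cons_of_neg (by simp [hqs']), if_pos (by simp [hqs']),
        ih _ _ hb]

-- any string starting with 'label ++ "["' is nonempty
lemma ne_empty_of_startswith_bracket (label s : String)
    (h : PySem.Str.startswith s (label ++ "[") = true) : s ≠ "" := by
  intro hs
  subst hs
  simp [PySem.Chars.startswith_iff] at h

-- ===== VERDICT (by name: the statement is the Claim_ definition above) =====
theorem pick_best_config_line_py_spec : Claim_equal_pick_best_config_line_py := by
  intro block label _
  unfold Spec_pick_best_config_line_py pick_best_config_line_py pick_best_config_line_py_alt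
  rw [pickLoopA_eq_loopG,
    loopG_eq_selG _ _ _ (fun s h => ne_empty_of_startswith_bracket label s h) _ _ _
      (fun b h => by cases h)]
  rfl
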